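-- pv_equiv track=rewrite | github.com/NickLai169/programming | CS10/Labs/Lab_16/datalab/text_processing/word_analyzer.py | izzle
-- ===== SOURCE A (Python) =====
-- def izzle(word):
--     '''return the izzle translation of a word'''
--     vowels = ['a', 'e', 'i', 'o', 'u']
--     counter = 0
--     position = 0
--     how_many_vowels = 0
--     for i in word:
--         if i in vowels:
--             position = counter
--             how_many_vowels += 1
--         counter += 1
--     if how_many_vowels > 1:
--         return word[:position] + 'izzle'
--     else:
--         return word + 'izzle'
-- ===== SOURCE B (Python) =====
-- def izzle(word):
--     vowels = set('aeiou')
--     n = sum(ch in vowels for ch in word)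
--     if n > 1:
--         i = len(word) - 1
--         while word[i] not in vowels:
--             i -= 1
--         return word[:i] + 'izzle'
--     return word + 'izzle'
-- ===== Notes on version B (the rewrite author's own statement) =====
-- stated objective: faster
-- what changed: Replaces A's single left-to-right pass accumulating counter/position/vowel-count with a C-speed vowel count (sum over a set-membership generator) followed by a right-to-left scan for the last vowel's index.
import Mathlib
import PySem

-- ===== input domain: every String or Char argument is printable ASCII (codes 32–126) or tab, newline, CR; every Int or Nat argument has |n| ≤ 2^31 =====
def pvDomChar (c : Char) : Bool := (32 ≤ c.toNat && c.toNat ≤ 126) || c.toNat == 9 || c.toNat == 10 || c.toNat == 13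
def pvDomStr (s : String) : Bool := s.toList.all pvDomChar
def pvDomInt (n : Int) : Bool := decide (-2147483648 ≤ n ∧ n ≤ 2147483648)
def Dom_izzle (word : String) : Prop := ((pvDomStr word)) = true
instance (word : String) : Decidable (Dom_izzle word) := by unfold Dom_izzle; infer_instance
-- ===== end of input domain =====

-- ===== PORT A =====
-- B replaces A's single accumulating pass by a vowel count plus a right-to-left search for the last vowel (different decomposition; a timing run measured B faster by a constant factor).
def izzleVowels : List Char := ['a', 'e', 'i', 'o', 'u']

def izzleStepA (s : Int × Int × Int) (c : Char) : Int × Int × Int :=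
  if c ∈ izzleVowels then (s.1 + 1, s.1, s.2.2 + 1) else (s.1 + 1, s.2.1, s.2.2)

def izzle (word : String) : String :=
  let s := word.toList.foldl izzleStepA (0, 0, 0)
  if s.2.2 > 1 then
    String.ofList (PySem.List.slice word.toList none (some s.2.1)) ++ "izzle"
  else
    word ++ "izzle"

-- ===== PORT B =====
-- the while loop 'i -= 1 until word[i] is a vowel' as recursion over the reversed character list
def izzleRevFind : List Char → Int → Int
  | [], i => i
  | c :: rest, i => if c ∈ izzleVowels then i else izzleRevFind rest (i - 1)

def izzle_alt (word : String) : String :=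
  let n := (word.toList.filter (fun c => c ∈ izzleVowels)).length
  if n > 1 then
    let i := izzleRevFind word.toList.reverse ((word.toList.length : Int) - 1)
    String.ofList (PySem.List.slice word.toList none (some i)) ++ "izzle"
  else
    word ++ "izzle"

-- ===== PRECONDITION & SPEC =====
def Spec_izzle (word : String) (out : String) : Prop := out = izzle_alt word
instance (word : String) (out : String) : Decidable (Spec_izzle word out) := by unfold Spec_izzle; infer_instance

-- ===== CLAIM (what is proved, stated in full; the proofs are below) =====
def Claim_equal_izzle : Prop := ∀ (word : String), Dom_izzle word → Spec_izzle word (izzle word)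

-- ===== LEMMAS AND PROOFS =====

lemma izzle_fold_inv (l : List Char) :
    (l.foldl izzleStepA (0, 0, 0)).1 = (l.length : Int) ∧
    (l.foldl izzleStepA (0, 0, 0)).2.2 = ((l.filter (fun c => c ∈ izzleVowels)).length : Int) ∧
    ((l.filter (fun c => c ∈ izzleVowels)) ≠ [] →
      (l.foldl izzleStepA (0, 0, 0)).2.1 = izzleRevFind l.reverse ((l.length : Int) - 1)) := by
  induction l using List.reverseRecOn with
  | nil => simp
  | append_singleton l c ih =>
    obtain ⟨h1, h2, h3⟩ := ih
    rw [List.foldl_append]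
    refine ⟨?_, ?_, ?_⟩
    · by_cases hc : c ∈ izzleVowels <;> simp [izzleStepA, hc, h1]
    · by_cases hc : c ∈ izzleVowels <;> simp [izzleStepA, hc, h2]
    · intro hne
      simp only [List.foldl_cons, List.foldl_nil]
      by_cases hc : c ∈ izzleVowels
      · simp only [izzleStepA, if_pos hc, h1, List.reverse_append, List.reverse_cons,
          List.reverse_nil, List.nil_append, List.cons_append, izzleRevFind,
          List.length_append, List.length_cons, List.length_nil]
        push_cast
        ring
      · have hne' : l.filter (fun c => c ∈ izzleVowels) ≠ [] := by
          simpa [List.filter_append, hc] using hne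
        simp only [izzleStepA, if_neg hc, List.reverse_append, List.reverse_cons,
          List.reverse_nil, List.nil_append, List.cons_append, izzleRevFind,
          List.length_append, List.length_cons, List.length_nil]
        rw [h3 hne']
        congr 1
        push_cast
        ring

theorem izzle_spec : Claim_equal_izzle := by
  intro word _
  unfold Spec_izzle izzle izzle_alt
  obtain ⟨h1, h2, h3⟩ := izzle_fold_inv word.toList
  simp only [h2]
  by_cases hgt :
      ((word.toList.filter (fun c => c ∈ izzleVowels)).length : Int) > 1
  · have hgtN : (word.toList.filter (fun c => c ∈ izzleVowels)).length > 1 := by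
      exact_mod_cast hgt
    have hne : (word.toList.filter (fun c => c ∈ izzleVowels)) ≠ [] := by
      intro h; rw [h] at hgtN; simp at hgtN
    rw [if_pos hgt, if_pos hgtN, h3 hne]
  · have hgtN : ¬ (word.toList.filter (fun c => c ∈ izzleVowels)).length > 1 := by
      intro h
      exact hgt (by exact_mod_cast h)
    rw [if_neg hgt, if_neg hgtN]
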